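-- pv_equiv track=rewrite | github.com/HBHATI04/LLM_Content_Planner | ai-engine/crew/chat_crew.py | _strip_export_request
-- ===== SOURCE A (Python) =====
-- PDF_KEYWORDS  = [
--     "as a pdf", "as pdf", "in pdf", "pdf format", "save as pdf",
--     "export pdf", "download pdf", "give me a pdf", "make a pdf",
--     "generate pdf", "output as pdf", "output in pdf", "pdf file",
--     "as a pdf file", "in pdf file",
-- ]
--
-- DOCX_KEYWORDS = [
--     "as a word", "as word", "in word", "word doc", "docx", ".docx",
--     "word document", "word format", "save as word", "export word",
--     "give me a word", "make a word doc", "as a doc", "in doc format",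
--     "as doc", "as a doc file", "doc file", "as doc file",
--     "generate doc", "output as doc", "output in doc", "in doc",
--     "as a word file", "word file", "generate word", "output as word",
--     "in word format", "as docx",
-- ]
--
-- def _strip_export_request(prompt: str) -> str:
--     lower = prompt.lower()
--     all_export_kw = PDF_KEYWORDS + DOCX_KEYWORDS + [
--         "generate output as", "output as", "save as", "export as",
--         "give output as", "give it as", "give me it as",
--     ]
--     cut_pos = len(prompt)
--     for kw in all_export_kw:
--         idx = lower.find(kw)
--         if idx != -1 and idx < cut_pos:
--             cut_pos = idx
--     stripped = prompt[:cut_pos].strip().rstrip(".,;")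
--     return stripped if stripped else prompt
-- ===== SOURCE B (Python) =====
-- PDF_KEYWORDS  = [
--     "as a pdf", "as pdf", "in pdf", "pdf format", "save as pdf",
--     "export pdf", "download pdf", "give me a pdf", "make a pdf",
--     "generate pdf", "output as pdf", "output in pdf", "pdf file",
--     "as a pdf file", "in pdf file",
-- ]
--
-- DOCX_KEYWORDS = [
--     "as a word", "as word", "in word", "word doc", "docx", ".docx",
--     "word document", "word format", "save as word", "export word",
--     "give me a word", "make a word doc", "as a doc", "in doc format",
--     "as doc", "as a doc file", "doc file", "as doc file",
--     "generate doc", "output as doc", "output in doc", "in doc",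
--     "as a word file", "word file", "generate word", "output as word",
--     "in word format", "as docx",
-- ]
--
-- EXTRA_KEYWORDS = [
--     "generate output as", "output as", "save as", "export as",
--     "give output as", "give it as", "give me it as",
-- ]
--
-- _KWS = tuple(PDF_KEYWORDS + DOCX_KEYWORDS + EXTRA_KEYWORDS)
--
-- def _strip_export_request(prompt: str) -> str:
--     lower = prompt.lower()
--     cut_pos = next((i for i in range(len(lower))
--                     if lower.startswith(_KWS, i)), len(prompt))
--     stripped = prompt[:cut_pos].strip().rstrip(".,;")
--     return stripped if stripped else prompt
-- ===== Notes on version B (the rewrite author's own statement) =====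
-- stated objective: alternative
-- what changed: Instead of A's K separate lower.find(kw) scans folded into a running minimum, B does one left-to-right scan over positions of the lowered prompt and stops at the first position where any export keyword starts (str.startswith with the precomputed keyword tuple), taking len(prompt) if none matches.
import Mathlib
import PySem

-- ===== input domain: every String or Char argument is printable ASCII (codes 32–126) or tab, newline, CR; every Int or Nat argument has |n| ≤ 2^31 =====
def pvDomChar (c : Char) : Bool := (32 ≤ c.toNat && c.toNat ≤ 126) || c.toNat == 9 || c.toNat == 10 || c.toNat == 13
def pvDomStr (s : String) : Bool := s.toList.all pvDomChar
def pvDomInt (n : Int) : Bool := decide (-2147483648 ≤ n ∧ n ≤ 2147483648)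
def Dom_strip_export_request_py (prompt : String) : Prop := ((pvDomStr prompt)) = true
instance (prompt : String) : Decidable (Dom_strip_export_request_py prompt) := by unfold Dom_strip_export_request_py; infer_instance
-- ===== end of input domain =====

-- B replaces A's K-fold "running minimum over lower.find(kw)" by one left-to-right scan
-- stopping at the first position where any export keyword starts (objective: alternative).

-- ===== PORT A =====
-- PDF_KEYWORDS ++ DOCX_KEYWORDS ++ the trailing phrases, in A's order
def pvKwsA : List String :=
  ["as a pdf", "as pdf", "in pdf", "pdf format", "save as pdf",
   "export pdf", "download pdf", "give me a pdf", "make a pdf",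
   "generate pdf", "output as pdf", "output in pdf", "pdf file",
   "as a pdf file", "in pdf file",
   "as a word", "as word", "in word", "word doc", "docx", ".docx",
   "word document", "word format", "save as word", "export word",
   "give me a word", "make a word doc", "as a doc", "in doc format",
   "as doc", "as a doc file", "doc file", "as doc file",
   "generate doc", "output as doc", "output in doc", "in doc",
   "as a word file", "word file", "generate word", "output as word",
   "in word format", "as docx",
   "generate output as", "output as", "save as", "export as",
   "give output as", "give it as", "give me it as"]

-- s.rstrip(".,;") — exact: drop trailing characters that are '.', ',' or ';' (PySem has no rstrip-with-chars)
def pvRstripPunct (s : String) : String :=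
  String.ofList ((s.toList.reverse.dropWhile (fun c => c ∈ ['.', ',', ';'])).reverse)

def strip_export_request_py (prompt : String) : String :=
  let lower := PySem.Str.lower prompt
  let cut_pos : Int := pvKwsA.foldl
    (fun cut_pos kw =>
      let idx := PySem.Str.find lower kw
      if idx ≠ -1 ∧ idx < cut_pos then idx else cut_pos)
    (PySem.Str.len prompt)
  let stripped := pvRstripPunct (PySem.Str.strip (PySem.Str.slice prompt none (some cut_pos)))
  if stripped ≠ "" then stripped else prompt

-- ===== PORT B =====
-- Source B's PDF_KEYWORDS / DOCX_KEYWORDS / EXTRA_KEYWORDS, and _KWS = their concatenation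
def pvPdfB : List String :=
  ["as a pdf", "as pdf", "in pdf", "pdf format", "save as pdf",
   "export pdf", "download pdf", "give me a pdf", "make a pdf",
   "generate pdf", "output as pdf", "output in pdf", "pdf file",
   "as a pdf file", "in pdf file"]

def pvDocxB : List String :=
  ["as a word", "as word", "in word", "word doc", "docx", ".docx",
   "word document", "word format", "save as word", "export word",
   "give me a word", "make a word doc", "as a doc", "in doc format",
   "as doc", "as a doc file", "doc file", "as doc file",
   "generate doc", "output as doc", "output in doc", "in doc",
   "as a word file", "word file", "generate word", "output as word",
   "in word format", "as docx"]

def pvExtraB : List String :=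
  ["generate output as", "output as", "save as", "export as",
   "give output as", "give it as", "give me it as"]

def pvKwsB : List String := pvPdfB ++ pvDocxB ++ pvExtraB

-- s.rstrip(".,;") for B, via rdropWhile
def pvRstripB (s : String) : String :=
  String.ofList (s.toList.rdropWhile (fun c => c == '.' || c == ',' || c == ';'))

-- Source B's `next((i for i in range(len(lower)) if lower.startswith(_KWS, i)), len(prompt))`:
-- first index i with some keyword a prefix of lower[i:]; findIdx? over the tails of `lower`
-- is that same scan (the extra final empty tail matches no keyword)
def strip_export_request_py_alt (prompt : String) : String :=
  let lower := PySem.Str.lower prompt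
  let cut_pos : Nat :=
    (lower.toList.tails.findIdx? (fun t => pvKwsB.any (fun kw => kw.toList.isPrefixOf t))).getD
      prompt.toList.length
  let stripped := pvRstripB (PySem.Str.strip (String.ofList (prompt.toList.take cut_pos)))
  if stripped = "" then prompt else stripped

-- ===== PRECONDITION & SPEC =====
def Spec_strip_export_request_py (prompt : String) (out : String) : Prop := out = strip_export_request_py_alt prompt
instance (prompt : String) (out : String) : Decidable (Spec_strip_export_request_py prompt out) := by unfold Spec_strip_export_request_py; infer_instance

-- ===== CLAIM (what is proved, stated in full; the proofs are below) =====
def Claim_equal_strip_export_request_py : Prop := ∀ (prompt : String), Dom_strip_export_request_py prompt → Spec_strip_export_request_py prompt (strip_export_request_py prompt)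

-- ===== LEMMAS AND PROOFS =====

lemma pvKwsB_eq : pvKwsB = pvKwsA := by decide

lemma pvKws_ne_nil : ∀ kw ∈ pvKwsA.map String.toList, kw ≠ [] := by decide

-- the two rstrip(".,;") helpers agree
lemma pvRstrip_eq (s : String) : pvRstripPunct s = pvRstripB s := by
  have hp : (fun c : Char => decide (c ∈ ['.', ',', ';']))
      = (fun c : Char => c == '.' || c == ',' || c == ';') := by
    funext c
    by_cases h1 : c = '.'
    · simp [h1]
    · by_cases h2 : c = ','
      · simp [h2]
      · by_cases h3 : c = ';'
        · simp [h3]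
        · simp [h1, h2, h3]
  unfold pvRstripPunct pvRstripB
  rw [List.rdropWhile, hp]

-- A's keyword fold, on the char-list side
def pvFoldA (L : List Char) (kws : List (List Char)) (n : Int) : Int :=
  kws.foldl
    (fun cut_pos kw =>
      let idx := PySem.Chars.find L kw
      if idx ≠ -1 ∧ idx < cut_pos then idx else cut_pos) n

lemma pvFoldA_spec (L : List Char) (kws : List (List Char)) (n : Int) :
    (pvFoldA L kws n = n ∨ ∃ kw ∈ kws, pvFoldA L kws n = PySem.Chars.find L kw ∧ PySem.Chars.find L kw ≠ -1)
    ∧ pvFoldA L kws n ≤ n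
    ∧ ∀ kw ∈ kws, PySem.Chars.find L kw ≠ -1 → pvFoldA L kws n ≤ PySem.Chars.find L kw := by
  induction kws generalizing n with
  | nil => simp [pvFoldA]
  | cons k ks ih =>
    simp only [pvFoldA, List.foldl_cons] at *
    by_cases h : PySem.Chars.find L k ≠ -1 ∧ PySem.Chars.find L k < n
    · rw [if_pos h]
      obtain ⟨h1, h2, h3⟩ := ih (PySem.Chars.find L k)
      refine ⟨?_, by omega, ?_⟩
      · rcases h1 with h1 | ⟨kw, hkw, he, hne⟩
        · exact Or.inr ⟨k, by simp, h1, h.1⟩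
        · exact Or.inr ⟨kw, by simp [hkw], he, hne⟩
      · intro kw hkw hne
        rcases List.mem_cons.mp hkw with rfl | hkw
        · exact h2
        · exact h3 kw hkw hne
    · rw [if_neg h]
      obtain ⟨h1, h2, h3⟩ := ih n
      refine ⟨?_, h2, ?_⟩
      · rcases h1 with h1 | ⟨kw, hkw, he, hne⟩
        · exact Or.inl h1
        · exact Or.inr ⟨kw, by simp [hkw], he, hne⟩
      · intro kw hkw hne
        rcases List.mem_cons.mp hkw with rfl | hkw
        · push Not at h
          have := h hne
          omega
        · exact h3 kw hkw hne

-- B's scan: specification of findIdx? over the tails of L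
lemma pvScan_some (kws : List (List Char)) (L : List Char) (i : Nat)
    (h : L.tails.findIdx? (fun t => kws.any (fun kw => kw.isPrefixOf t)) = some i) :
    (∃ kw ∈ kws, kw <+: L.drop i) ∧ ∀ j < i, ¬ ∃ kw ∈ kws, kw <+: L.drop j := by
  obtain ⟨hlt, hidx⟩ := List.findIdx?_eq_some_iff_findIdx_eq.mp h
  have hlen : L.tails.length = L.length + 1 := by simp
  constructor
  · have hw : i < L.tails.length := hlt
    have := List.findIdx_getElem (p := fun t => kws.any (fun kw => kw.isPrefixOf t))
      (xs := L.tails) (w := by rw [hidx]; exact hw)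
    rw [List.getElem_tails] at this
    rw [hidx] at this
    simp only [List.any_eq_true] at this
    obtain ⟨kw, hkw, hp⟩ := this
    exact ⟨kw, hkw, List.isPrefixOf_iff_prefix.mp hp⟩
  · intro j hj
    rintro ⟨kw, hkw, hp⟩
    have hjlt : j < List.findIdx (fun t => kws.any (fun kw => kw.isPrefixOf t)) L.tails := by
      omega
    have := List.not_of_lt_findIdx hjlt
    rw [List.getElem_tails] at this
    simp only [List.any_eq_false] at this
    have hf := this kw hkw
    simp only [List.isPrefixOf_iff_prefix] at hf
    exact hf hp

lemma pvScan_none (kws : List (List Char)) (L : List Char)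
    (h : L.tails.findIdx? (fun t => kws.any (fun kw => kw.isPrefixOf t)) = none) :
    ∀ j, ¬ ∃ kw ∈ kws, kw <+: L.drop j := by
  intro j
  rintro ⟨kw, hkw, hp⟩
  have hmem : L.drop j ∈ L.tails := (List.mem_tails _ _).2 (List.drop_suffix j L)
  have := List.findIdx?_eq_none_iff.mp h _ hmem
  simp only [List.any_eq_false] at this
  have hf := this kw hkw
  simp only [List.isPrefixOf_iff_prefix] at hf
  exact hf hp

-- the heart: A's min-of-finds equals B's first-match position
lemma pvCut_eq (L : List Char) :
    pvFoldA L (pvKwsA.map String.toList) (L.length : Int)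
      = (((L.tails.findIdx? (fun t => (pvKwsA.map String.toList).any (fun kw => kw.isPrefixOf t))).getD
          L.length : Nat) : Int) := by
  obtain ⟨h1, h2, h3⟩ := pvFoldA_spec L (pvKwsA.map String.toList) (L.length : Int)
  match hs : L.tails.findIdx? (fun t => (pvKwsA.map String.toList).any (fun kw => kw.isPrefixOf t)) with
  | none =>
    have hall := pvScan_none (pvKwsA.map String.toList) L hs
    simp only [Option.getD_none]
    rcases h1 with h1 | ⟨kw, hkw, he, hne⟩
    · exact h1
    · exfalso
      have hinf : kw <:+: L := (PySem.Chars.find_ne_neg_one_iff L kw).mp hne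
      obtain ⟨j, hj⟩ := (PySem.Chars.exists_prefix_drop_iff_isIn kw L).mpr
        ((PySem.Chars.isIn_iff_infix kw L).mpr hinf)
      exact hall j ⟨kw, hkw, hj⟩
  | some i =>
    simp only [Option.getD_some]
    obtain ⟨⟨kw₀, hkw₀, hp₀⟩, hmin⟩ := pvScan_some (pvKwsA.map String.toList) L i hs
    have hne₀ : PySem.Chars.find L kw₀ ≠ -1 := by
      rw [PySem.Chars.find_ne_neg_one_iff, ← PySem.Chars.isIn_iff_infix,
        ← PySem.Chars.exists_prefix_drop_iff_isIn]
      exact ⟨i, hp₀⟩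
    have hpos₀ : 0 ≤ PySem.Chars.find L kw₀ := by
      have := PySem.Chars.neg_one_le_find L kw₀; omega
    obtain ⟨hocc₀, hmin₀⟩ := PySem.Chars.find_spec hpos₀
    have hle : (PySem.Chars.find L kw₀).toNat ≤ i := by
      by_contra hlt
      exact hmin₀ i (by omega) hp₀
    have hge : i ≤ (PySem.Chars.find L kw₀).toNat := by
      by_contra hlt
      exact hmin _ (by omega) ⟨kw₀, hkw₀, hocc₀⟩
    have hfi : PySem.Chars.find L kw₀ = (i : Int) := by omega
    have hilt : i < L.length := by
      by_contra hge'
      have hnil : L.drop i = [] := List.drop_eq_nil_of_le (by omega)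
      rw [hnil] at hp₀
      exact pvKws_ne_nil kw₀ hkw₀ (List.prefix_nil.mp hp₀)
    have hub : pvFoldA L (pvKwsA.map String.toList) (L.length : Int) ≤ (i : Int) :=
      hfi ▸ h3 kw₀ hkw₀ hne₀
    rcases h1 with h1 | ⟨kw, hkw, he, hnek⟩
    · omega
    · have hposk : 0 ≤ PySem.Chars.find L kw := by
        have := PySem.Chars.neg_one_le_find L kw; omega
      obtain ⟨hocck, _⟩ := PySem.Chars.find_spec hposk
      have hgek : i ≤ (PySem.Chars.find L kw).toNat := by
        by_contra hlt
        exact hmin _ (by omega) ⟨kw, hkw, hocck⟩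
      omega

lemma pvLength_lower (L : List Char) : (PySem.Chars.lower L).length = L.length := by
  simp [PySem.Chars.lower]

-- ===== VERDICT (by name: the statement is the Claim_ definition above) =====
theorem strip_export_request_py_spec : Claim_equal_strip_export_request_py := by
  intro prompt _
  unfold Spec_strip_export_request_py
  simp only [strip_export_request_py, strip_export_request_py_alt, pvKwsB_eq]
  have hL : (PySem.Str.lower prompt).toList.length = prompt.toList.length := by
    rw [PySem.Str.toList_lower, pvLength_lower]
  have hpred : (fun t => pvKwsA.any (fun kw => kw.toList.isPrefixOf t))
      = (fun t => (pvKwsA.map String.toList).any (fun kw => kw.isPrefixOf t)) := by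
    funext t
    simp [List.any_map, Function.comp_def]
  have hfold : pvKwsA.foldl
      (fun cut_pos kw =>
        let idx := PySem.Str.find (PySem.Str.lower prompt) kw
        if idx ≠ -1 ∧ idx < cut_pos then idx else cut_pos) (PySem.Str.len prompt)
      = ((((PySem.Str.lower prompt).toList.tails.findIdx?
            (fun t => pvKwsA.any (fun kw => kw.toList.isPrefixOf t))).getD
          prompt.toList.length : Nat) : Int) := by
    have hlen : PySem.Str.len prompt = ((PySem.Str.lower prompt).toList.length : Int) := by
      rw [hL]; simp [PySem.Str.len]
    rw [hpred, hlen, ← hL, ← pvCut_eq]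
    simp [pvFoldA, List.foldl_map]
  rw [hfold]
  have hsl : ∀ k : Nat, PySem.Str.slice prompt none (some (k : Int))
      = String.ofList (prompt.toList.take k) := by
    intro k
    apply String.toList_inj.mp
    simp [PySem.Str.toList_slice, PySem.List.slice_to_natCast]
  rw [hsl, pvRstrip_eq]
  set s := pvRstripB (PySem.Str.strip (String.ofList (prompt.toList.take _))) with hs
  by_cases hemp : s = ""
  · simp [hemp]
  · simp [hemp]
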